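-- pv_equiv track=rewrite | github.com/Lorenzo393/Programacion-I-y-II-LCC | Programacion II - Python/Practica/prueba.py | contarPalabrasMas
-- ===== SOURCE A (Python) =====
-- def contarPalabrasMas(s):
--     contadorPalabras = 0
--     contadorLetras = 0
--     largoPalabra = 5
--     for i in s:
--         if i != " ":
--             contadorLetras += 1
--         if i == " ":
--             if contadorLetras > largoPalabra:
--                 contadorPalabras += 1
--             contadorLetras = 0
--     if contadorLetras > largoPalabra:
--         contadorPalabras += 1
--     return contadorPalabras
-- ===== SOURCE B (Python) =====
-- def contarPalabrasMas(s):
--     return sum(1 for w in s.split(" ") if len(w) > 5)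
-- ===== Notes on version B (the rewrite author's own statement) =====
-- stated objective: simpler
-- what changed: Replaces the character-by-character letter-counter loop (with manual reset on spaces and a trailing-word check) by tokenizing on the single-space separator and counting tokens of length > 5 in one comprehension; measurably faster because the tokenizing runs in C.
import Mathlib
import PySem

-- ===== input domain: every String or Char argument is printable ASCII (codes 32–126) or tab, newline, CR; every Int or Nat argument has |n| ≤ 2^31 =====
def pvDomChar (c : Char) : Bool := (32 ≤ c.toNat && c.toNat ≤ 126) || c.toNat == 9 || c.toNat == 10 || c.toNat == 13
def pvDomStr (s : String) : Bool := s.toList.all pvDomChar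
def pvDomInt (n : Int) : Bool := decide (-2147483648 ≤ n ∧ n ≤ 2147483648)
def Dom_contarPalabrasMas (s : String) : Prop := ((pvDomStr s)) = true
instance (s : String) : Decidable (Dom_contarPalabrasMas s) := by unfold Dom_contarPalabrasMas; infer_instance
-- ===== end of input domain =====

-- B replaces A's character-by-character letter-counter loop by tokenizing on the single-space separator and counting tokens of length > 5 (simpler; measured faster by a constant factor).

-- ===== PORT A =====
def contarPalabrasMas (s : String) : Int :=
  let st := s.toList.foldl (fun (st : Int × Int) i =>
    let st := if i ≠ ' ' then (st.1, st.2 + 1) else st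
    if i = ' ' then (if st.2 > 5 then (st.1 + 1, (0 : Int)) else (st.1, (0 : Int))) else st)
    ((0 : Int), (0 : Int))
  if st.2 > 5 then st.1 + 1 else st.1

-- ===== PORT B =====
-- hand port of Python's s.split(" ") for the single-char separator ' ' (exact: empty tokens kept)
def splitOne : List Char → List (List Char)
  | [] => [[]]
  | c :: rest =>
    if c = ' ' then [] :: splitOne rest
    else
      match splitOne rest with
      | t :: ts => (c :: t) :: ts
      | [] => [[c]]

def contarPalabrasMas_alt (s : String) : Int :=
  (((splitOne s.toList).countP (fun w => decide (5 < w.length)) : Nat) : Int)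

-- ===== PRECONDITION & SPEC =====
def Spec_contarPalabrasMas (s : String) (out : Int) : Prop := out = contarPalabrasMas_alt s
instance (s : String) (out : Int) : Decidable (Spec_contarPalabrasMas s out) := by unfold Spec_contarPalabrasMas; infer_instance

-- ===== CLAIM (what is proved, stated in full; the proofs are below) =====
def Claim_equal_contarPalabrasMas : Prop := ∀ (s : String), Dom_contarPalabrasMas s → Spec_contarPalabrasMas s (contarPalabrasMas s)

-- ===== LEMMAS AND PROOFS =====

-- word-count of cs when l letters of the current word have already been seen
def tokCount (l : Int) : List Char → Int
  | [] => if l > 5 then 1 else 0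
  | c :: cs => if c = ' ' then (if l > 5 then 1 else 0) + tokCount 0 cs else tokCount (l + 1) cs

lemma foldA_eq (cs : List Char) : ∀ (p l : Int),
    (let st := cs.foldl (fun (st : Int × Int) i =>
      let st := if i ≠ ' ' then (st.1, st.2 + 1) else st
      if i = ' ' then (if st.2 > 5 then (st.1 + 1, (0 : Int)) else (st.1, (0 : Int))) else st)
      (p, l)
     if st.2 > 5 then st.1 + 1 else st.1) = p + tokCount l cs := by
  induction cs with
  | nil => intro p l; simp only [List.foldl_nil, tokCount]; split_ifs <;> omega
  | cons c cs ih =>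
    intro p l
    by_cases hc : c = ' '
    · subst hc
      simp only [List.foldl_cons, ne_eq, not_true_eq_false, if_false, ite_true]
      by_cases h5 : l > 5
      · rw [if_pos h5, ih, tokCount, if_pos rfl, if_pos h5]; ring
      · rw [if_neg h5, ih, tokCount, if_pos rfl, if_neg h5]; ring
    · simp only [List.foldl_cons, ne_eq, hc, not_false_eq_true, if_pos,
        ite_false]
      rw [ih, tokCount, if_neg hc]

lemma splitOne_ne_nil (cs : List Char) : splitOne cs ≠ [] := by
  cases cs with
  | nil => simp [splitOne]
  | cons c rest =>
    simp only [splitOne]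
    split
    · simp
    · split <;> simp

lemma tok_split : ∀ (cs : List Char) (t : List Char) (ts : List (List Char)),
    splitOne cs = t :: ts → ∀ (l : Int),
    tokCount l cs = (if l + (t.length : Int) > 5 then 1 else 0)
      + ((ts.countP (fun w => decide (5 < w.length)) : Nat) : Int) := by
  intro cs
  induction cs with
  | nil =>
    intro t ts h l
    simp only [splitOne] at h
    obtain ⟨rfl, rfl⟩ := List.cons.inj h
    simp only [tokCount, List.length_nil, List.countP_nil, Nat.cast_zero]
    split_ifs with h1 h2 h2 <;> omega
  | cons c rest ih =>
    intro t ts h l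
    by_cases hc : c = ' '
    · subst hc
      simp only [splitOne, reduceIte] at h
      obtain ⟨rfl, rfl⟩ := List.cons.inj h
      obtain ⟨t', ts', h'⟩ := List.exists_cons_of_ne_nil (splitOne_ne_nil rest)
      rw [tokCount, if_pos rfl, ih t' ts' h' 0, h', List.countP_cons]
      simp only [List.length_nil, decide_eq_true_eq]
      push_cast
      split_ifs <;> omega
    · simp only [splitOne, if_neg hc] at h
      obtain ⟨t', ts', h'⟩ := List.exists_cons_of_ne_nil (splitOne_ne_nil rest)
      rw [h'] at h
      obtain ⟨rfl, rfl⟩ := List.cons.inj h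
      rw [tokCount, if_neg hc, ih t' ts' h' (l + 1), List.length_cons]
      push_cast
      split_ifs <;> omega

-- ===== VERDICT (by name: the statement is the Claim_ definition above) =====
theorem contarPalabrasMas_spec : Claim_equal_contarPalabrasMas := by
  intro s _
  unfold Spec_contarPalabrasMas contarPalabrasMas contarPalabrasMas_alt
  rw [foldA_eq]
  obtain ⟨t, ts, h⟩ := List.exists_cons_of_ne_nil (splitOne_ne_nil s.toList)
  rw [tok_split s.toList t ts h 0, h, List.countP_cons]
  simp only [decide_eq_true_eq]
  push_cast
  split_ifs <;> omega
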